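-- pv_equiv track=rewrite | github.com/roncuevas/Polymorphism | Models/xfasta.py | get_variant_id
-- ===== SOURCE A (Python) =====
-- def get_variant_id(data):
--     labels = list()
--     var = ""
--     for variant in data:
--         for char in variant[0]:
--             if char == ">":
--                 continue
--             elif char == " ":
--                 labels.append(var)
--                 var = ""
--                 break
--             else:
--                 var += char
--     return labels
-- ===== SOURCE B (Python) =====
-- def get_variant_id(data):
--     labels = []
--     for variant in data:
--         s = variant[0]
--         i = s.find(" ")
--         if i != -1:
--             labels.append("".join(c for c in s[:i] if c != ">"))
--     return labels
-- ===== Notes on version B (the rewrite author's own statement) =====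
-- stated objective: simpler
-- what changed: Replaces A's char-by-char accumulator with cross-variant leftover state by a per-variant find-first-space / slice / filter-'>' decomposition with no carried state.
-- intended difference: On inputs where some variant whose first string has no space but has a non-'>' character precedes a variant whose first string has a space, A leaks the leftover accumulator into the next label (e.g. [['ab'],['c d']] -> ['abc']) while B returns the label of each space-containing variant alone (['c']), which is the intended per-variant extraction. — e.g. on get_variant_id([["ab"], ["c d"]]): A returns ["abc"], B returns ["c"]
import Mathlib
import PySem

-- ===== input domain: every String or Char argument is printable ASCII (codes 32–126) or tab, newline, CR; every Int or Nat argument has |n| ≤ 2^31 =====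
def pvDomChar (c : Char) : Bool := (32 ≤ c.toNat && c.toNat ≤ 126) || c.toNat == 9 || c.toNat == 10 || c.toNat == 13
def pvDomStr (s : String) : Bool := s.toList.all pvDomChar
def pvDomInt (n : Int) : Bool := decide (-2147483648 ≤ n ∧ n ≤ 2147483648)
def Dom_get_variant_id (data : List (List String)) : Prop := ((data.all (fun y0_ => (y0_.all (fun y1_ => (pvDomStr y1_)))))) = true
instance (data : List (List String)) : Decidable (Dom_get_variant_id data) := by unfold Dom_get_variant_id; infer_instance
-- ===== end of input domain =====

-- B replaces A's char-by-char accumulator (whose leftover state leaks across variants)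
-- by a per-variant find-first-space / slice / drop-'>' decomposition; equal cost, simpler.

-- ===== PORT A =====
-- inner 'for char in variant[0]' loop: continue on '>', append var and break on ' ', else var += char
def getVariantInner : List Char → String → List String → String × List String
  | [], var, labels => (var, labels)
  | c :: cs, var, labels =>
    if c = '>' then getVariantInner cs var labels
    else if c = ' ' then ("", labels ++ [var])
    else getVariantInner cs (var.push c) labels

def get_variant_id (data : List (List String)) : List String :=
  (data.foldl (fun (st : String × List String) variant =>
      getVariantInner (variant.headD "").toList st.1 st.2)   -- variant[0]; Pre_ excludes empty variants
    ("", [])).2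

-- ===== PORT B =====
def get_variant_id_alt (data : List (List String)) : List String :=
  data.foldl (fun labels variant =>
    let s := variant.headD ""                                 -- variant[0]; Pre_ excludes empty variants
    let i := PySem.Str.find s " "
    if i ≠ -1 then
      labels ++ [String.ofList ((PySem.Str.slice s none (some i)).toList.filter (fun c => c ≠ '>'))]
    else labels) []

-- ===== PRECONDITION & SPEC =====
-- Pre_ excludes inputs containing an empty variant list, on which A (variant[0]) raises IndexError.
def Pre_get_variant_id (data : List (List String)) : Prop := ∀ v ∈ data, v ≠ []
instance (data : List (List String)) : Decidable (Pre_get_variant_id data) := by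
  unfold Pre_get_variant_id; infer_instance

def pvWitness_get_variant_id : List (List String) := [[">x abc"], [">y2 d"]]

-- On inputs where some variant whose first string has no space but has a non-'>' character precedes a
-- variant whose first string has a space, A leaks the leftover accumulator into the next label
-- (e.g. [["ab"],["c d"]] → ["abc"]) while B returns each space-containing variant's own label (["c"]),
-- the intended per-variant extraction.
def pvHasSpc (s : String) : Bool := decide (' ' ∈ s.toList)
def pvHasCont (s : String) : Bool := decide (s.toList.count '>' < s.toList.length)
def pvDbool : List String → Bool
  | [] => false
  | s :: rest => (!pvHasSpc s && pvHasCont s && rest.any pvHasSpc) || pvDbool rest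

def D_get_variant_id (data : List (List String)) : Prop :=
  pvDbool (data.map (fun v => v.headD "")) = true
instance (data : List (List String)) : Decidable (D_get_variant_id data) := by
  unfold D_get_variant_id; infer_instance

def Spec_get_variant_id (data : List (List String)) (out : List String) : Prop :=
  ¬ D_get_variant_id data → out = get_variant_id_alt data
instance (data : List (List String)) (out : List String) : Decidable (Spec_get_variant_id data out) := by
  unfold Spec_get_variant_id; infer_instance

def pvDiffWitness_get_variant_id : List (List String) := [["ab"], ["c d"]]
def pvDiffWitnessOut_get_variant_id : (List String) × (List String) := (["abc"], ["c"])

-- ===== CLAIM (what is proved, stated in full; the proofs are below) =====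
def Claim_unchanged_get_variant_id : Prop := ∀ (data : List (List String)), Dom_get_variant_id data → Pre_get_variant_id data → Spec_get_variant_id data (get_variant_id data)
def Claim_exact_get_variant_id : Prop := ∀ (data : List (List String)), Dom_get_variant_id data → Pre_get_variant_id data → D_get_variant_id data → get_variant_id data ≠ get_variant_id_alt data
def Claim_changed_get_variant_id : Prop := Dom_get_variant_id (pvDiffWitness_get_variant_id) ∧ Pre_get_variant_id (pvDiffWitness_get_variant_id) ∧ D_get_variant_id (pvDiffWitness_get_variant_id) ∧ get_variant_id (pvDiffWitness_get_variant_id) = pvDiffWitnessOut_get_variant_id.1 ∧ get_variant_id_alt (pvDiffWitness_get_variant_id) = pvDiffWitnessOut_get_variant_id.2 ∧ pvDiffWitnessOut_get_variant_id.1 ≠ pvDiffWitnessOut_get_variant_id.2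

-- ===== LEMMAS AND PROOFS =====

-- proof-only abbreviations for the two folds
def foldAP (ds : List (List String)) (st : String × List String) : String × List String :=
  ds.foldl (fun st variant => getVariantInner (variant.headD "").toList st.1 st.2) st

def foldBP (ds : List (List String)) (labels : List String) : List String :=
  ds.foldl (fun labels variant =>
    let s := variant.headD ""
    let i := PySem.Str.find s " "
    if i ≠ -1 then
      labels ++ [String.ofList ((PySem.Str.slice s none (some i)).toList.filter (fun c => c ≠ '>'))]
    else labels) labels


-- A's inner loop characterised: if the chars contain a space, append var ++ the '>'-free prefix
-- before the first space and reset; otherwise accumulate the '>'-free chars into var.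
theorem innerA_char (cs : List Char) (var : String) (labels : List String) :
    getVariantInner cs var labels =
      if ' ' ∈ cs then
        ("", labels ++ [String.ofList (var.toList ++ (cs.takeWhile (fun c => c ≠ ' ')).filter (fun c => c ≠ '>'))])
      else (String.ofList (var.toList ++ cs.filter (fun c => c ≠ '>')), labels) := by
  induction cs generalizing var labels with
  | nil => simp [getVariantInner]
  | cons c cs ih =>
    by_cases hgt : c = '>'
    · subst hgt
      simp [getVariantInner, ih]
    · by_cases hsp : c = ' '
      · subst hsp
        simp [getVariantInner]
      · rw [getVariantInner]
        simp only [if_neg hgt, if_neg hsp]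
        rw [ih]
        simp [List.mem_cons, hsp, hgt, Ne.symm hsp]

theorem singleton_prefix_iff (l : List Char) : [' '] <+: l ↔ l.head? = some ' ' := by
  cases l with
  | nil => simp
  | cons a t =>
    constructor
    · rintro ⟨u, hu⟩
      simp at hu
      simp [hu.1.symm]
    · intro h
      simp at h
      exact ⟨t, by simp [h]⟩

theorem take_eq_takeWhile_of (cs : List Char) (k : Nat)
    (hk : cs[k]? = some ' ') (hmin : ∀ i < k, cs[i]? ≠ some ' ') :
    cs.take k = cs.takeWhile (fun c => c ≠ ' ') := by
  induction cs generalizing k with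
  | nil => simp
  | cons c cs ih =>
    cases k with
    | zero =>
      simp at hk
      simp [hk]
    | succ k =>
      have hc : c ≠ ' ' := by
        have := hmin 0 (Nat.succ_pos k)
        simpa using this
      simp only [List.take_succ_cons, List.takeWhile_cons]
      rw [ih k (by simpa using hk) (fun i hi => by
        have := hmin (i+1) (by omega)
        simpa using this)]
      simp [hc]

theorem find_space (cs : List Char) (h : ' ' ∈ cs) :
    PySem.Chars.find cs [' '] ≠ -1 ∧
    cs.take (PySem.Chars.find cs [' ']).toNat = cs.takeWhile (fun c => c ≠ ' ') := by
  have hinf : [' '] <:+: cs := by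
    obtain ⟨u, t, rfl⟩ := List.append_of_mem h
    exact ⟨u, t, by simp⟩
  have hne : PySem.Chars.find cs [' '] ≠ -1 := (PySem.Chars.find_ne_neg_one_iff cs [' ']).mpr hinf
  have hnn : 0 ≤ PySem.Chars.find cs [' '] := (PySem.Chars.find_nonneg_iff cs [' ']).mpr hinf
  obtain ⟨hpre, hmin⟩ := PySem.Chars.find_spec hnn
  refine ⟨hne, take_eq_takeWhile_of cs _ ?_ ?_⟩
  · have := (singleton_prefix_iff _).mp hpre
    rwa [List.head?_drop] at this
  · intro i hi hcon
    exact hmin i hi ((singleton_prefix_iff _).mpr (by rwa [List.head?_drop]))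

theorem find_space_none (cs : List Char) (h : ' ' ∉ cs) :
    PySem.Chars.find cs [' '] = -1 := by
  rw [PySem.Chars.find_eq_neg_one_iff]
  intro hinf
  exact h (List.singleton_sublist.mp hinf.sublist)

-- when no head string contains a space, A appends nothing and B appends nothing
theorem runA_no_space (ds : List (List String)) (var : String) (labels : List String)
    (h : ∀ v ∈ ds, ' ' ∉ (v.headD "").toList) :
    (ds.foldl (fun (st : String × List String) variant =>
        getVariantInner (variant.headD "").toList st.1 st.2) (var, labels)).2 = labels := by
  induction ds generalizing var with
  | nil => rfl
  | cons v ds ih =>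
    have hv : ' ' ∉ (v.headD "").toList := h v (List.mem_cons_self)
    rw [List.foldl_cons, innerA_char, if_neg hv]
    exact ih _ (fun w hw => h w (List.mem_cons_of_mem _ hw))

theorem runB_no_space (ds : List (List String)) (labels : List String)
    (h : ∀ v ∈ ds, ' ' ∉ (v.headD "").toList) :
    ds.foldl (fun labels variant =>
      let s := variant.headD ""
      let i := PySem.Str.find s " "
      if i ≠ -1 then
        labels ++ [String.ofList ((PySem.Str.slice s none (some i)).toList.filter (fun c => c ≠ '>'))]
      else labels) labels = labels := by
  induction ds with
  | nil => rfl
  | cons v ds ih =>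
    have hv : ' ' ∉ (v.headD "").toList := h v (List.mem_cons_self)
    have hf : PySem.Str.find (v.headD "") " " = -1 := by
      rw [PySem.Str.find_eq]
      have : (" " : String).toList = [' '] := by decide
      rw [this]
      exact find_space_none _ hv
    rw [List.foldl_cons]
    simp only [hf]
    simp only [ne_eq, not_true_eq_false, if_false]
    exact ih (fun w hw => h w (List.mem_cons_of_mem _ hw))

theorem main_run (ds : List (List String)) (labels : List String)
    (h : pvDbool (ds.map (fun v => v.headD "")) = false) :
    (ds.foldl (fun (st : String × List String) variant =>
        getVariantInner (variant.headD "").toList st.1 st.2) ("", labels)).2 =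
    ds.foldl (fun labels variant =>
      let s := variant.headD ""
      let i := PySem.Str.find s " "
      if i ≠ -1 then
        labels ++ [String.ofList ((PySem.Str.slice s none (some i)).toList.filter (fun c => c ≠ '>'))]
      else labels) labels := by
  induction ds generalizing labels with
  | nil => rfl
  | cons v ds ih =>
    simp only [List.map_cons, pvDbool, Bool.or_eq_false_iff, Bool.and_eq_false_iff] at h
    obtain ⟨h1, h2⟩ := h
    by_cases hs : ' ' ∈ (v.headD "").toList
    · -- this variant contributes a label in both programs
      obtain ⟨hne, htake⟩ := find_space _ hs
      have hsub : (" " : String).toList = [' '] := by decide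
      have hf : PySem.Str.find (v.headD "") " " = PySem.Chars.find (v.headD "").toList [' '] := by
        rw [PySem.Str.find_eq, hsub]
      have hinf : [' '] <:+: (v.headD "").toList := by
        obtain ⟨u, t, huv⟩ := List.append_of_mem hs
        exact ⟨u, t, by rw [huv]; simp⟩
      have hnn : 0 ≤ PySem.Chars.find (v.headD "").toList [' '] :=
        (PySem.Chars.find_nonneg_iff _ _).mpr hinf
      rw [List.foldl_cons, innerA_char, if_pos hs, List.foldl_cons]
      simp only [hf, hne, ne_eq, not_false_eq_true, if_pos]
      have hsl : PySem.Chars.slice (v.headD "").toList none (some (PySem.Chars.find (v.headD "").toList [' ']))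
          = (v.headD "").toList.takeWhile (fun c => c ≠ ' ') := by
        have he : PySem.Chars.slice (v.headD "").toList none (some (PySem.Chars.find (v.headD "").toList [' ']))
            = PySem.List.slice (v.headD "").toList none (some (PySem.Chars.find (v.headD "").toList [' '])) := rfl
        rw [he, PySem.List.slice_to _ hnn, htake]
      rw [PySem.Str.toList_slice, hsl]
      have := ih (labels ++ [String.ofList (((v.headD "").toList.takeWhile fun c => c ≠ ' ').filter fun c => c ≠ '>')]) h2
      simpa using this
    · have hf : PySem.Str.find (v.headD "") " " = -1 := by
        rw [PySem.Str.find_eq]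
        have hsub : (" " : String).toList = [' '] := by decide
        rw [hsub]
        exact find_space_none _ hs
      rw [List.foldl_cons, innerA_char, if_neg hs, List.foldl_cons]
      simp only [hf, ne_eq, not_true_eq_false, if_false]
      by_cases hc : pvHasCont (v.headD "") = true
      · -- leftover content but, outside D_, no later variant has a space
        have hall : ∀ w ∈ ds, ' ' ∉ (w.headD "").toList := by
          rcases h1 with (h1 | h1) | h1
          · exfalso
            apply hs
            have h1' : pvHasSpc (v.headD "") = true := by
              revert h1; cases pvHasSpc (v.headD "") <;> simp
            simpa [pvHasSpc] using h1'
          · exact absurd hc (by simp only [Bool.not_eq_true]; exact h1)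
          · intro w hw hmem
            simp only [List.any_eq_false, List.mem_map] at h1
            apply h1 _ ⟨w, hw, rfl⟩
            simpa [pvHasSpc] using hmem
        rw [runA_no_space _ _ _ hall, runB_no_space _ _ hall]
      · -- all chars are '>': the accumulator stays empty
        have hfil : (v.headD "").toList.filter (fun c => c ≠ '>') = [] := by
          rw [List.filter_eq_nil_iff]
          intro a ha
          simp only [pvHasCont, decide_eq_true_eq, not_lt] at hc
          have hcnt : List.count '>' (v.headD "").toList = (v.headD "").toList.length :=
            le_antisymm (List.count_le_length) hc
          have := List.count_eq_length.mp hcnt a ha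
          simp [this.symm]
        rw [hfil]
        have := ih labels h2
        simpa using this


theorem foldAP_labels (ds : List (List String)) (var : String) (labels : List String) :
    (foldAP ds (var, labels)).2 = labels ++ (foldAP ds (var, [])).2 := by
  induction ds generalizing var labels with
  | nil => simp [foldAP]
  | cons v ds ih =>
    simp only [foldAP, List.foldl_cons]
    by_cases hs : ' ' ∈ (v.headD "").toList
    · rw [innerA_char, if_pos hs, innerA_char, if_pos hs]
      show (foldAP ds _).2 = _ ++ (foldAP ds _).2
      rw [ih, ih "" ([] ++ _)]
      simp
    · rw [innerA_char, if_neg hs, innerA_char, if_neg hs]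
      show (foldAP ds _).2 = _ ++ (foldAP ds _).2
      rw [ih]

theorem foldBP_labels (ds : List (List String)) (labels : List String) :
    foldBP ds labels = labels ++ foldBP ds [] := by
  induction ds generalizing labels with
  | nil => simp [foldBP]
  | cons v ds ih =>
    simp only [foldBP, List.foldl_cons]
    by_cases hf : PySem.Str.find (v.headD "") " " = -1
    · simp only [hf, ne_eq, not_true_eq_false, if_false]
      exact ih labels
    · simp only [hf, ne_eq, not_false_eq_true, if_true]
      show foldBP ds _ = _ ++ foldBP ds _
      rw [ih, ih ([] ++ _)]
      simp

theorem cont_strip_ne (s : String) (hc : pvHasCont s = true) :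
    s.toList.filter (fun c => c ≠ '>') ≠ [] := by
  simp only [pvHasCont, decide_eq_true_eq] at hc
  intro hnil
  rw [List.filter_eq_nil_iff] at hnil
  have : List.count '>' s.toList = s.toList.length := List.count_eq_length.mpr (by
    intro b hb
    have hb' : b = '>' := by simpa using hnil b hb
    exact hb'.symm)
  omega

theorem tight_main (ds : List (List String)) (var : String) (labels : List String)
    (h : pvDbool (ds.map (fun v => v.headD "")) = true ∨
         (var ≠ "" ∧ (ds.map (fun v => v.headD "")).any pvHasSpc = true)) :
    (foldAP ds (var, labels)).2 ≠ foldBP ds labels := by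
  induction ds generalizing var labels with
  | nil =>
    rcases h with h | ⟨_, h⟩ <;> simp [pvDbool] at h
  | cons v ds ih =>
    simp only [foldAP, foldBP, List.foldl_cons]
    by_cases hs : ' ' ∈ (v.headD "").toList
    · -- this variant appends a label in both runs
      obtain ⟨hne, htake⟩ := find_space _ hs
      have hsub : (" " : String).toList = [' '] := by decide
      have hf : PySem.Str.find (v.headD "") " " = PySem.Chars.find (v.headD "").toList [' '] := by
        rw [PySem.Str.find_eq, hsub]
      have hinf : [' '] <:+: (v.headD "").toList := by
        obtain ⟨u, t, huv⟩ := List.append_of_mem hs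
        exact ⟨u, t, by rw [huv]; simp⟩
      have hnn : 0 ≤ PySem.Chars.find (v.headD "").toList [' '] :=
        (PySem.Chars.find_nonneg_iff _ _).mpr hinf
      have hsl : PySem.Chars.slice (v.headD "").toList none (some (PySem.Chars.find (v.headD "").toList [' ']))
          = (v.headD "").toList.takeWhile (fun c => c ≠ ' ') := by
        have he : PySem.Chars.slice (v.headD "").toList none (some (PySem.Chars.find (v.headD "").toList [' ']))
            = PySem.List.slice (v.headD "").toList none (some (PySem.Chars.find (v.headD "").toList [' '])) := rfl
        rw [he, PySem.List.slice_to _ hnn, htake]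
      rw [innerA_char, if_pos hs]
      simp only [hf, hne, ne_eq, not_false_eq_true, if_pos]
      rw [PySem.Str.toList_slice, hsl]
      by_cases hv : var = ""
      · subst hv
        -- equal labels so far; the leak condition must live in the tail
        have htail : pvDbool (ds.map (fun v => v.headD "")) = true := by
          rcases h with h | ⟨hv', _⟩
          · simp only [List.map_cons, pvDbool, Bool.or_eq_true, Bool.and_eq_true,
              Bool.not_eq_true'] at h
            rcases h with ⟨⟨h0, _⟩, _⟩ | h
            · exfalso
              have hns : ¬ ' ' ∈ (v.headD "").toList := by simpa [pvHasSpc] using h0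
              exact hns hs
            · exact h
          · exact absurd rfl hv'
        have := ih "" (labels ++ [String.ofList ((List.takeWhile (fun c => decide (c ≠ ' ')) (v.headD "").toList).filter (fun c => decide (c ≠ '>')))]) (Or.inl htail)
        simpa [foldAP, foldBP] using this
      · -- the carried var makes this label strictly longer in A than in B
        intro heq
        have heq' : (foldAP ds ("", labels ++ [String.ofList (var.toList ++ ((v.headD "").toList.takeWhile (fun c => c ≠ ' ')).filter (fun c => c ≠ '>'))])).2
            = foldBP ds (labels ++ [String.ofList (((v.headD "").toList.takeWhile (fun c => c ≠ ' ')).filter (fun c => c ≠ '>'))]) := heq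
        rw [foldAP_labels, foldBP_labels, List.append_assoc, List.append_assoc] at heq'
        have hmid := List.append_cancel_left heq'
        have hab : String.ofList (var.toList ++ ((v.headD "").toList.takeWhile (fun c => c ≠ ' ')).filter (fun c => c ≠ '>'))
            = String.ofList (((v.headD "").toList.takeWhile (fun c => c ≠ ' ')).filter (fun c => c ≠ '>')) := by
          have := congrArg List.head? hmid
          simpa using this
        have hlen := congrArg (fun t : String => t.toList.length) hab
        simp at hlen
        exact hv hlen
    · -- no space: A only accumulates into var, B skips
      have hf : PySem.Str.find (v.headD "") " " = -1 := by
        rw [PySem.Str.find_eq]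
        have hsub : (" " : String).toList = [' '] := by decide
        rw [hsub]
        exact find_space_none _ hs
      rw [innerA_char, if_neg hs]
      simp only [hf, ne_eq, not_true_eq_false, if_false]
      show (foldAP ds (_, labels)).2 ≠ foldBP ds labels
      apply ih
      rcases h with h | ⟨hv, hany⟩
      · simp only [List.map_cons, pvDbool, Bool.or_eq_true, Bool.and_eq_true,
          Bool.not_eq_true'] at h
        rcases h with ⟨⟨_, hcont⟩, hany⟩ | h
        · refine Or.inr ⟨?_, hany⟩
          intro h0
          have hts := congrArg String.toList h0
          simp at hts
          apply cont_strip_ne _ hcont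
          rw [List.filter_eq_nil_iff]
          intro a ha
          have ha' : a ∈ (v.head?.getD "").toList := by
            cases v with
            | nil => simp at ha
            | cons x xs => simpa using ha
          simp [hts.2 a ha']
        · exact Or.inl h
      · refine Or.inr ⟨?_, ?_⟩
        · intro h0
          apply hv
          have := congrArg String.toList h0
          simp at this
          exact this.1
        · simp only [List.map_cons, List.any_cons, Bool.or_eq_true] at hany
          rcases hany with hany | hany
          · exfalso
            have : ' ' ∈ (v.headD "").toList := by simpa [pvHasSpc] using hany
            exact hs this
          · exact hany

-- ===== VERDICT (by name: the statement is the Claim_ definition above) =====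
theorem get_variant_id_spec : Claim_unchanged_get_variant_id := by
  intro data _ _ hD
  have h : pvDbool (data.map (fun v => v.headD "")) = false := by
    unfold D_get_variant_id at hD
    exact Bool.eq_false_iff.mpr hD
  exact main_run data [] h

theorem get_variant_id_changed : Claim_changed_get_variant_id := by
  unfold Claim_changed_get_variant_id; decide

theorem get_variant_id_tight : Claim_exact_get_variant_id := by
  intro data _ _ hD
  unfold D_get_variant_id at hD
  exact tight_main data "" [] (Or.inl hD)
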